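-- pv_equiv track=rewrite | github.com/dino-research/code-scan-agent | code_scan_agent/intelligent/scanner.py | _build_config_string
-- ===== SOURCE A (Python) =====
-- from typing import Dict, List, Any, Optional
--
-- def _build_config_string(rules: List[str]) -> str:
--     """Build config string from rules list"""
--     if not rules:
--         return "auto"
--
--     # ALWAYS prioritize 'auto' for maximum coverage (18 findings)
--     # The intelligent enhancement will be done in post-processing
--     if "auto" in rules:
--         return "auto"
--
--     # If no auto but we have specific rules, pick the first one
--     # (Semgrep doesn't support comma-separated configs in registry URLs)
--     if rules:
--         # Prioritize comprehensive rules
--         priority_order = ["p/security-audit", "p/owasp-top-ten", "r/python.lang.security"]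
--         for priority_rule in priority_order:
--             if priority_rule in rules:
--                 return priority_rule
--
--         # Fallback to first rule
--         return rules[0]
--
--     # Final fallback to auto
--     return "auto"
-- ===== SOURCE B (Python) =====
-- def _build_config_string(rules):
--     """Build config string from rules list"""
--     if not rules:
--         return "auto"
--     ranks = {"auto": 0, "p/security-audit": 1, "p/owasp-top-ten": 2,
--              "r/python.lang.security": 3}
--     return min(rules, key=lambda r: ranks.get(r, 4))
-- ===== Notes on version B (the rewrite author's own statement) =====
-- stated objective: alternative
-- what changed: Instead of testing membership of each priority rule in turn, B assigns each rule a numeric rank (auto=0, the three priority rules 1-3, anything else 4) and takes the stable minimum over the input list, so the fallback to rules[0] falls out of min's first-occurrence tie-break.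
import Mathlib
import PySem

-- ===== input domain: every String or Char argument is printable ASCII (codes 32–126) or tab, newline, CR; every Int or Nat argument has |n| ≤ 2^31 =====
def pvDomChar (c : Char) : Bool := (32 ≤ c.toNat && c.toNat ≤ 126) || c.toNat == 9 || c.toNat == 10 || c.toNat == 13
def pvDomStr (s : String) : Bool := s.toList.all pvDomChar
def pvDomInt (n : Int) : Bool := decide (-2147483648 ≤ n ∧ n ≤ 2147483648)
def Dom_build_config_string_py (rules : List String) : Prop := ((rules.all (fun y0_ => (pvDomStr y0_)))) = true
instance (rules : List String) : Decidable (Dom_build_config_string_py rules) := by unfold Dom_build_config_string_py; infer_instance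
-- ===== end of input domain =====

-- B picks the rule by a numeric rank (auto=0, priority rules 1-3, others 4) with a stable min,
-- instead of A's membership loop over the priority list; same result, different decomposition.


-- ===== PORT A =====
-- the 'for priority_rule in priority_order: if priority_rule in rules: return priority_rule' loop
def pyPriorityLoop : List String → List String → Option String
  | [], _ => none
  | p :: ps, rules => if rules.contains p then some p else pyPriorityLoop ps rules

def build_config_string_py (rules : List String) : String :=
  match rules with
  | [] => "auto"
  | r0 :: rest =>
    if (r0 :: rest).contains "auto" then "auto"
    else
      match pyPriorityLoop ["p/security-audit", "p/owasp-top-ten", "r/python.lang.security"] (r0 :: rest) with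
      | some p => p
      | none => r0

-- ===== PORT B =====
-- ranks.get(r, 4)
def pvRank (r : String) : Nat :=
  if r = "auto" then 0
  else if r = "p/security-audit" then 1
  else if r = "p/owasp-top-ten" then 2
  else if r = "r/python.lang.security" then 3
  else 4

-- min(rules, key=…) : stable first-occurrence minimum, as a left fold
def build_config_string_py_alt (rules : List String) : String :=
  match rules with
  | [] => "auto"
  | r0 :: rest => rest.foldl (fun best r => if pvRank r < pvRank best then r else best) r0

-- ===== PRECONDITION & SPEC =====
def Spec_build_config_string_py (rules : List String) (out : String) : Prop := out = build_config_string_py_alt rules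
instance (rules : List String) (out : String) : Decidable (Spec_build_config_string_py rules out) := by unfold Spec_build_config_string_py; infer_instance

-- ===== CLAIM (what is proved, stated in full; the proofs are below) =====
def Claim_equal_build_config_string_py : Prop := ∀ (rules : List String), Dom_build_config_string_py rules → Spec_build_config_string_py rules (build_config_string_py rules)

-- ===== LEMMAS AND PROOFS =====

def pvFMin (b : String) (l : List String) : String :=
  l.foldl (fun best r => if pvRank r < pvRank best then r else best) b

theorem pvFMin_mem (l : List String) (b : String) : pvFMin b l = b ∨ pvFMin b l ∈ l := by
  induction l generalizing b with
  | nil => exact Or.inl rfl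
  | cons x xs ih =>
    rcases ih (if pvRank x < pvRank b then x else b) with h | h
    · rw [pvFMin, List.foldl_cons]
      rw [pvFMin] at h; rw [h]
      split
      · right; exact List.mem_cons_self
      · left; rfl
    · right; exact List.mem_cons_of_mem _ h

theorem pvFMin_le_b (l : List String) (b : String) : pvRank (pvFMin b l) ≤ pvRank b := by
  induction l generalizing b with
  | nil => exact le_refl _
  | cons x xs ih =>
    have := ih (if pvRank x < pvRank b then x else b)
    rw [pvFMin, List.foldl_cons]
    refine le_trans this ?_
    split <;> omega

theorem pvFMin_le_mem (l : List String) (b : String) :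
    ∀ x ∈ l, pvRank (pvFMin b l) ≤ pvRank x := by
  induction l generalizing b with
  | nil => intro x hx; cases hx
  | cons y ys ih =>
    intro x hx
    rw [pvFMin, List.foldl_cons]
    rcases List.mem_cons.mp hx with rfl | hx
    · refine le_trans (pvFMin_le_b ys _) ?_
      split <;> omega
    · exact ih _ x hx

theorem pvFMin_stay (l : List String) (b : String)
    (h : ∀ x ∈ l, pvRank b ≤ pvRank x) : pvFMin b l = b := by
  induction l with
  | nil => rfl
  | cons x xs ih =>
    rw [pvFMin, List.foldl_cons]
    have hx : ¬ pvRank x < pvRank b := not_lt.mpr (h x (by simp))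
    rw [if_neg hx]
    exact ih (fun y hy => h y (by simp [hy]))

theorem pvRank_eq_zero {x : String} (h : pvRank x = 0) : x = "auto" := by
  unfold pvRank at h; split_ifs at h <;> simp_all

theorem pvRank_eq_one {x : String} (h : pvRank x = 1) : x = "p/security-audit" := by
  unfold pvRank at h; split_ifs at h <;> simp_all

theorem pvRank_eq_two {x : String} (h : pvRank x = 2) : x = "p/owasp-top-ten" := by
  unfold pvRank at h; split_ifs at h <;> simp_all

theorem pvRank_eq_three {x : String} (h : pvRank x = 3) : x = "r/python.lang.security" := by
  unfold pvRank at h; split_ifs at h <;> simp_all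

theorem pvRank_of_other {x : String} (h0 : x ≠ "auto") (h1 : x ≠ "p/security-audit")
    (h2 : x ≠ "p/owasp-top-ten") (h3 : x ≠ "r/python.lang.security") : pvRank x = 4 := by
  unfold pvRank; split_ifs <;> simp_all

theorem pv_AB_eq (rules : List String) :
    build_config_string_py rules = build_config_string_py_alt rules := by
  match rules with
  | [] => rfl
  | r0 :: rest =>
    have hmem : pvFMin r0 rest = r0 ∨ pvFMin r0 rest ∈ rest := pvFMin_mem rest r0
    have hmem' : pvFMin r0 rest ∈ r0 :: rest := by
      rcases hmem with h | h
      · rw [h]; exact List.mem_cons_self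
      · exact List.mem_cons_of_mem _ h
    have hle : ∀ x ∈ r0 :: rest, pvRank (pvFMin r0 rest) ≤ pvRank x := by
      intro x hx
      rcases List.mem_cons.mp hx with h | hx
      · rw [h]; exact pvFMin_le_b rest r0
      · exact pvFMin_le_mem rest r0 x hx
    by_cases h0 : "auto" ∈ r0 :: rest
    · -- A returns "auto"; B's min has rank 0, the unique rank-0 string
      have hc : (r0 :: rest).contains "auto" = true := by simpa using h0
      have hr0 : pvRank (pvFMin r0 rest) = 0 := by
        have := hle "auto" h0
        rw [show pvRank "auto" = 0 from by decide] at this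
        omega
      simp only [build_config_string_py, build_config_string_py_alt, hc, if_true]
      exact (pvRank_eq_zero hr0).symm
    · have hc : (r0 :: rest).contains "auto" = false := by
        simp only [List.contains_eq_mem, decide_eq_false_iff_not]; exact h0
      have hne0 : pvRank (pvFMin r0 rest) ≠ 0 := fun h =>
        h0 (pvRank_eq_zero h ▸ hmem')
      by_cases h1 : "p/security-audit" ∈ r0 :: rest
      · have hc1 : (r0 :: rest).contains "p/security-audit" = true := by simpa using h1
        have hr : pvRank (pvFMin r0 rest) = 1 := by
          have := hle _ h1
          rw [show pvRank "p/security-audit" = 1 from by decide] at this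
          omega
        simp only [build_config_string_py, build_config_string_py_alt,
          pyPriorityLoop, hc, hc1, if_true, Bool.false_eq_true, if_false]
        exact (pvRank_eq_one hr).symm
      · have hc1 : (r0 :: rest).contains "p/security-audit" = false := by
          simp only [List.contains_eq_mem, decide_eq_false_iff_not]; exact h1
        have hne1 : pvRank (pvFMin r0 rest) ≠ 1 := fun h =>
          h1 (pvRank_eq_one h ▸ hmem')
        by_cases h2 : "p/owasp-top-ten" ∈ r0 :: rest
        · have hc2 : (r0 :: rest).contains "p/owasp-top-ten" = true := by simpa using h2
          have hr : pvRank (pvFMin r0 rest) = 2 := by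
            have := hle _ h2
            rw [show pvRank "p/owasp-top-ten" = 2 from by decide] at this
            omega
          simp only [build_config_string_py, build_config_string_py_alt,
            pyPriorityLoop, hc, hc1, hc2, if_true, Bool.false_eq_true, if_false]
          exact (pvRank_eq_two hr).symm
        · have hc2 : (r0 :: rest).contains "p/owasp-top-ten" = false := by
            simp only [List.contains_eq_mem, decide_eq_false_iff_not]; exact h2
          have hne2 : pvRank (pvFMin r0 rest) ≠ 2 := fun h =>
            h2 (pvRank_eq_two h ▸ hmem')
          by_cases h3 : "r/python.lang.security" ∈ r0 :: rest
          · have hc3 : (r0 :: rest).contains "r/python.lang.security" = true := by simpa using h3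
            have hr : pvRank (pvFMin r0 rest) = 3 := by
              have := hle _ h3
              rw [show pvRank "r/python.lang.security" = 3 from by decide] at this
              omega
            simp only [build_config_string_py, build_config_string_py_alt,
              pyPriorityLoop, hc, hc1, hc2, hc3, if_true, Bool.false_eq_true, if_false]
            exact (pvRank_eq_three hr).symm
          · have hc3 : (r0 :: rest).contains "r/python.lang.security" = false := by
              simp only [List.contains_eq_mem, decide_eq_false_iff_not]; exact h3
            -- no priority rule present: every rank is 4 and the fold keeps r0
            have hall : ∀ x ∈ r0 :: rest, pvRank x = 4 := by
              intro x hx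
              exact pvRank_of_other
                (fun e => h0 (e ▸ hx)) (fun e => h1 (e ▸ hx))
                (fun e => h2 (e ▸ hx)) (fun e => h3 (e ▸ hx))
            have hstay : pvFMin r0 rest = r0 :=
              pvFMin_stay rest r0 (fun x hx => by
                rw [hall x (List.mem_cons_of_mem _ hx), hall r0 List.mem_cons_self])
            simp only [build_config_string_py, build_config_string_py_alt,
              pyPriorityLoop, hc, hc1, hc2, hc3, Bool.false_eq_true, if_false]
            exact hstay.symm

-- ===== VERDICT (by name: the statement is the Claim_ definition above) =====
theorem build_config_string_py_spec : Claim_equal_build_config_string_py := by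
  intro rules _
  exact pv_AB_eq rules
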